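-- pv_equiv track=rewrite | github.com/SYYDSN/py_projects | NewISpider/orm_unit/sql_module.py | check_composite_keys
-- ===== SOURCE A (Python) =====
-- def unique_str_in_box(box: list, a_str: str) -> bool:
--     """
--     检查一个字符串是否在box中唯一.
--     如果唯一,就把字符串加入box,返回True,否则直接返回False
--     :param box:
--     :param a_str:
--     :return: 唯一返回True,否则返回False
--     """
--     if a_str not in box:
--         box.append(a_str)
--         return True
--     else:
--         return False
--
-- def join_composite_keys(doc: dict, keys: list, separator: str = "") -> str:
--     """
--     把一个字典类型的文档的复合键取出来.
--     :param doc: 待提取复合键的文档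
--     :param keys: 复合键名的序列,这个应该是去重后的序列
--     :param separator: 分割符,默认为空字符
--     :return: 组合后的复合键的字符串
--     """
--     a_list = [(k, str(v)) for k, v in doc.items() if k in keys]
--     a_list.sort(key=lambda obj: obj[0])
--     return separator.join([x[-1] for x in a_list])
--
-- def check_composite_keys(raw_doc, keys: (list, tuple, set) = None) -> list:
--     """
--     检查一组拥有复合键的字典类型的文档,去掉从重复的文档
--     :param raw_doc: 可能存在重复情况的拥有复合键的字典对象
--     :param keys:  复合键的序列,
--     :return:
--     """
--     result = list()
--     if len(raw_doc) > 1: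
--         keys = keys if isinstance(keys, set) else set(keys)
--         keys = list(keys)
--         temp_list = list()
--         result = [x for x in raw_doc if unique_str_in_box(box=temp_list, a_str=join_composite_keys(doc=x, keys=keys))]
--     else:
--         result = raw_doc
--     return result
-- ===== SOURCE B (Python) =====
-- def check_composite_keys(raw_doc, keys: (list, tuple, set) = None) -> list:
--     """Sieve-style dedup: repeatedly emit the head and filter out every later
--     doc whose composite key equals the head's; no seen-set is maintained."""
--     if len(raw_doc) <= 1:
--         return raw_doc
--     names = sorted(set(keys))
--     tagged = [("".join(str(d[k]) for k in names if k in d), d) for d in raw_doc]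
--     out = []
--     while tagged:
--         k0, d0 = tagged[0]
--         out.append(d0)
--         tagged = [(k, d) for (k, d) in tagged[1:] if k != k0]
--     return out
-- ===== Notes on version B (the rewrite author's own statement) =====
-- stated objective: alternative
-- what changed: B replaces A's seen-list-of-keys plus result-append loop by a sieve: tag each doc with its composite key (built by iterating the sorted key names with dict lookups instead of filtering and sorting doc.items()), then repeatedly emit the head doc and filter every later doc sharing its key out of the remaining list, so no seen collection is ever maintained.
import Mathlib
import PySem

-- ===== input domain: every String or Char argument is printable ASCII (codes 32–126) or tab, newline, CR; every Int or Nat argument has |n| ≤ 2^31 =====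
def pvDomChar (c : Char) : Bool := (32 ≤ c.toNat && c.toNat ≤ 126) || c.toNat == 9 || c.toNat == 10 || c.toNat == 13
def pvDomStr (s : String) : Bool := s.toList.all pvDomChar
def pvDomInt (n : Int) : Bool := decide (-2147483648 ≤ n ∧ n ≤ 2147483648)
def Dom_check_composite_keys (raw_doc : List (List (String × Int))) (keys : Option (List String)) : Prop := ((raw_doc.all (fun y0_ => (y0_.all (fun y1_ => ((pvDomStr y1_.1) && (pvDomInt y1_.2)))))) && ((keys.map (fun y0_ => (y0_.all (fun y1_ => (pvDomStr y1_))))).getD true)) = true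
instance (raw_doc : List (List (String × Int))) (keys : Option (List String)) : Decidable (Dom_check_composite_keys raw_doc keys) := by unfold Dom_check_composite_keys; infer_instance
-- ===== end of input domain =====

-- ===== PORT A =====
-- B deduplicates by a sieve (emit head, filter its key out of the remainder) instead of
-- A's seen-list + result-list loop, and builds composite keys from the sorted key names;
-- same return value, proved below.

-- join_composite_keys(doc, keys, "") : filter doc.items() by key membership, str() the
-- values, sort the pairs by key name, join the second components.
def pvJoinA (doc : List (String × Int)) (klist : List String) : String :=
  let a_list := (doc.filter (fun p => klist.contains p.1)).map (fun p => (p.1, PySem.Int.toStr p.2))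
  let a_list := PySem.List.sorted a_list (fun p => p.1)
  PySem.Str.join "" (a_list.map (fun p => p.2))

def check_composite_keys (raw_doc : List (List (String × Int))) (keys : Option (List String)) : List (List (String × Int)) :=
  if 1 < raw_doc.length then
    match keys with
    | none => []  -- Python: set(None) raises TypeError here; excluded by Pre_
    | some ks =>
      -- keys = list(set(keys)); only membership in it is ever used
      let klist : List String := PySem.Set.ofList ks
      -- the comprehension over raw_doc with unique_str_in_box mutating temp_list (box)
      let st := raw_doc.foldl
        (fun (st : List String × List (List (String × Int))) x =>
          let s := pvJoinA x klist
          if st.1.contains s then st else (st.1 ++ [s], st.2 ++ [x]))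
        ([], [])
      st.2
  else raw_doc

-- ===== PORT B =====
-- "".join(str(doc[k]) for k in names if k in doc)
def pvJoinB (doc : List (String × Int)) (names : List String) : String :=
  PySem.Str.join "" (names.filterMap (fun k => ((PySem.Dict.mk doc).get? k).map PySem.Int.toStr))

-- the while loop: emit the head doc, filter its key out of the rest, repeat
def pvSieve (tagged : List (String × List (String × Int))) : List (List (String × Int)) :=
  match tagged with
  | [] => []
  | (k0, d0) :: rest => d0 :: pvSieve (rest.filter (fun p => p.1 ≠ k0))
termination_by tagged.length
decreasing_by
  simpa using le_trans (List.length_filter_le _ _) (by simp)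

def check_composite_keys_alt (raw_doc : List (List (String × Int))) (keys : Option (List String)) : List (List (String × Int)) :=
  if raw_doc.length ≤ 1 then raw_doc
  else
    match keys with
    | none => []  -- Python: sorted(set(None)) raises TypeError here; excluded by Pre_
    | some ks =>
      let names := PySem.List.sorted (PySem.Set.ofList ks) (fun k => k)
      pvSieve (raw_doc.map (fun d => (pvJoinB d names, d)))

-- ===== PRECONDITION & SPEC =====
-- Pre_ excludes (a) keys = None with more than one doc, where Python A raises TypeError
-- (set(None)), and (b) docs whose association list repeats a key, which is not a valid
-- representation of a Python dict (the argument raw_doc holds dicts, whose keys are unique).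
def Pre_check_composite_keys (raw_doc : List (List (String × Int))) (keys : Option (List String)) : Prop :=
  (1 < raw_doc.length → keys ≠ none) ∧ ∀ doc ∈ raw_doc, (doc.map Prod.fst).Nodup
instance (raw_doc : List (List (String × Int))) (keys : Option (List String)) : Decidable (Pre_check_composite_keys raw_doc keys) := by unfold Pre_check_composite_keys; infer_instance

def pvWitness_check_composite_keys : (List (List (String × Int))) × Option (List String) :=
  ([[("a", 1), ("b", 2)], [("a", 1)], [("b", 3)]], some ["a", "b"])

def Spec_check_composite_keys (raw_doc : List (List (String × Int))) (keys : Option (List String)) (out : List (List (String × Int))) : Prop := out = check_composite_keys_alt raw_doc keys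
instance (raw_doc : List (List (String × Int))) (keys : Option (List String)) (out : List (List (String × Int))) : Decidable (Spec_check_composite_keys raw_doc keys out) := by unfold Spec_check_composite_keys; infer_instance

-- ===== CLAIM (what is proved, stated in full; the proofs are below) =====
def Claim_equal_check_composite_keys : Prop := ∀ (raw_doc : List (List (String × Int))) (keys : Option (List String)), Dom_check_composite_keys raw_doc keys → Pre_check_composite_keys raw_doc keys → Spec_check_composite_keys raw_doc keys (check_composite_keys raw_doc keys)

-- ===== LEMMAS AND PROOFS =====

-- pulling the pair apart: mapping snd over a filterMap that tags results with their key
theorem pv_filterMap_snd {κ ν β : Type} (l : List κ) (f : κ → Option ν) (g : ν → β) :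
    (l.filterMap (fun k => (f k).map (fun v => (k, g v)))).map Prod.snd
      = l.filterMap (fun k => (f k).map g) := by
  induction l with
  | nil => rfl
  | cons k t ih => cases h : f k <;> simp [h, ih]

-- the first components of such a filterMap form a sublist of the source list
theorem pv_filterMap_fst_sublist {κ ν β : Type} (l : List κ) (f : κ → Option ν) (g : ν → β) :
    ((l.filterMap (fun k => (f k).map (fun v => (k, g v)))).map Prod.fst).Sublist l := by
  induction l with
  | nil => simp
  | cons k t ih =>
    cases h : f k with
    | none => simp only [List.filterMap_cons, h, Option.map_none]; exact ih.cons k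
    | some v => simp only [List.filterMap_cons, h, Option.map_some, List.map_cons]; exact ih.cons₂ k

-- composite-key agreement: on a duplicate-free doc, A's filter-sort-join equals B's
-- walk over the sorted distinct key names
theorem pv_join_eq (doc : List (String × Int)) (ks : List String)
    (hnd : (doc.map Prod.fst).Nodup) :
    pvJoinA doc (PySem.Set.ofList ks)
      = pvJoinB doc (PySem.List.sorted (PySem.Set.ofList ks) (fun k => k)) := by
  simp only [pvJoinA, pvJoinB]
  rw [← pv_filterMap_snd (PySem.List.sorted (PySem.Set.ofList ks) (fun k => k))
        (fun k => (PySem.Dict.mk doc).get? k) PySem.Int.toStr]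
  have hget : ∀ (k : String) (v : Int), (PySem.Dict.mk doc).get? k = some v ↔ (k, v) ∈ doc := by
    intro k v
    have h := PySem.Dict.get?_eq_some_iff_mem_items (PySem.Dict.mk doc) k v
      (by simpa [PySem.Dict.keys_mk] using hnd)
    simpa using h
  have hsubfst := pv_filterMap_fst_sublist (PySem.List.sorted (PySem.Set.ofList ks) (fun k => k))
      (fun k => (PySem.Dict.mk doc).get? k) PySem.Int.toStr
  have hsort : PySem.List.sorted
      ((doc.filter (fun p => List.contains (PySem.Set.ofList ks) p.1)).map (fun p => (p.1, PySem.Int.toStr p.2)))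
      (fun p => p.1)
      = (PySem.List.sorted (PySem.Set.ofList ks) (fun k => k)).filterMap
          (fun k => ((PySem.Dict.mk doc).get? k).map (fun v => (k, PySem.Int.toStr v))) := by
    apply PySem.List.sorted_eq_of_perm_of_pairwise_lt
    · -- permutation: both lists hold (k, str v) for exactly the pairs (k, v) ∈ doc with k ∈ set(ks)
      have hndnames : (PySem.List.sorted (PySem.Set.ofList ks) (fun k => k)).Nodup :=
        (PySem.List.sorted_perm _ _ _).nodup_iff.mpr (PySem.Set.nodup_ofList ks)
      have hndLB : ((PySem.List.sorted (PySem.Set.ofList ks) (fun k => k)).filterMap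
          (fun k => ((PySem.Dict.mk doc).get? k).map (fun v => (k, PySem.Int.toStr v)))).Nodup :=
        ((hsubfst.nodup hndnames)).of_map Prod.fst
      have hndM : ((doc.filter (fun p => List.contains (PySem.Set.ofList ks) p.1)).map
          (fun p => (p.1, PySem.Int.toStr p.2))).Nodup := by
        refine List.Nodup.of_map Prod.fst ?_
        have heq : ((doc.filter (fun p => List.contains (PySem.Set.ofList ks) p.1)).map
            (fun p => (p.1, PySem.Int.toStr p.2))).map Prod.fst
            = (doc.filter (fun p => List.contains (PySem.Set.ofList ks) p.1)).map Prod.fst := by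
          simp [List.map_map, Function.comp]
        rw [heq]
        exact List.Sublist.nodup (List.Sublist.map Prod.fst (List.filter_sublist)) hnd
      refine (List.perm_ext_iff_of_nodup hndLB hndM).mpr ?_
      intro a
      simp only [List.mem_filterMap, Option.map_eq_some_iff, List.mem_map, List.mem_filter,
        PySem.List.mem_sorted, PySem.Set.mem_ofList, List.contains_iff_mem]
      constructor
      · rintro ⟨k, hk, v, hv, rfl⟩
        refine ⟨(k, v), ⟨(hget k v).mp hv, ?_⟩, rfl⟩
        simpa [PySem.Set.mem_ofList] using hk
      · rintro ⟨p, ⟨hp, hq⟩, rfl⟩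
        refine ⟨p.1, ?_, p.2, (hget p.1 p.2).mpr hp, rfl⟩
        simpa [PySem.Set.mem_ofList] using hq
    · -- strictly key-increasing, inherited from the sorted distinct names
      exact List.pairwise_map.mp (List.Pairwise.sublist hsubfst (PySem.List.sorted_ofList_pairwise_lt ks))
  rw [hsort]

-- unfolding equations for the sieve (well-founded recursion)
theorem pvSieve_nil : pvSieve [] = [] := by
  rw [pvSieve]

theorem pvSieve_cons (k0 : String) (d0 : List (String × Int))
    (rest : List (String × List (String × Int))) :
    pvSieve ((k0, d0) :: rest) = d0 :: pvSieve (rest.filter (fun p => p.1 ≠ k0)) := by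
  rw [pvSieve]

-- two successive key filters merge into the filter against the extended box
theorem pv_filter_box {δ : Type} (l : List (String × δ)) (box : List String) (k : String) :
    l.filter (fun p => !((box ++ [k]).contains p.1))
      = (l.filter (fun p => !(box.contains p.1))).filter (fun p => p.1 ≠ k) := by
  rw [List.filter_filter]
  apply List.filter_congr
  intro p _
  simp [Bool.and_comm]

-- A's (seen box, result) fold over docs equals the sieve over the key-tagged docs with
-- the already-seen keys filtered away
theorem pv_loop_sieve (docs : List (List (String × Int)))
    (f g : List (String × Int) → String)
    (hfg : ∀ x ∈ docs, f x = g x)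
    (box : List String) (res : List (List (String × Int))) :
    (docs.foldl
      (fun (st : List String × List (List (String × Int))) x =>
        let s := f x
        if st.1.contains s then st else (st.1 ++ [s], st.2 ++ [x]))
      (box, res)).2
      = res ++ pvSieve ((docs.map (fun d => (g d, d))).filter (fun p => !(box.contains p.1))) := by
  induction docs generalizing box res with
  | nil => simp [pvSieve_nil]
  | cons x t ih =>
    have hx : f x = g x := hfg x (by simp)
    have hfg' : ∀ y ∈ t, f y = g y := fun y hy => hfg y (by simp [hy])
    simp only [List.foldl_cons, List.map_cons, List.filter_cons, hx]
    by_cases hc : box.contains (g x) = true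
    · simp only [hc, if_pos, Bool.not_true, if_neg, Bool.false_eq_true, not_false_iff]
      exact ih hfg' box res
    · have hc' : box.contains (g x) = false := by simpa using hc
      simp only [hc', Bool.not_false, if_pos, if_neg, Bool.false_eq_true, not_false_iff]
      rw [ih hfg' (box ++ [g x]) (res ++ [x]),
        pv_filter_box (t.map (fun d => (g d, d))) box (g x), pvSieve_cons]
      simp

-- ===== VERDICT (by name: the statement is the Claim_ definition above) =====
theorem check_composite_keys_spec : Claim_equal_check_composite_keys := by
  intro raw_doc keys hdom hpre
  unfold Spec_check_composite_keys check_composite_keys check_composite_keys_alt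
  by_cases h : 1 < raw_doc.length
  · rw [if_pos h, if_neg (by omega)]
    cases keys with
    | none => exact absurd rfl (hpre.1 h)
    | some ks =>
      have h1 := pv_loop_sieve raw_doc
        (fun x => pvJoinA x (PySem.Set.ofList ks))
        (fun x => pvJoinB x (PySem.List.sorted (PySem.Set.ofList ks) (fun k => k)))
        (fun x hx => pv_join_eq x ks (hpre.2 x hx)) [] []
      simpa using h1
  · rw [if_neg h, if_pos (by omega)]
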